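-- pv_equiv track=rewrite | github.com/bekirdag/gpt-creator | scripts/python/write_refine_task_prompt.py | parse_context_sections
-- ===== SOURCE A (Python) =====
-- def parse_context_sections(blob):
--     sections = []
--     current_title = "Context"
--     current_lines = []
--     for line in blob.splitlines():
--         if line.startswith("----- FILE:"):
--             if current_lines:
--                 sections.append((current_title, "\n".join(current_lines).strip()))
--             current_title = line.split(":", 1)[-1].strip() or "Context"
--             current_lines = []
--         elif line.startswith("## "):
--             if current_lines:
--                 sections.append((current_title, "\n".join(current_lines).strip()))
--             current_title = line[3:].strip() or "Context"
--             current_lines = []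
--         elif line.startswith("# "):
--             continue
--         else:
--             current_lines.append(line)
--     if current_lines:
--         sections.append((current_title, "\n".join(current_lines).strip()))
--     deduped = []
--     seen = set()
--     for title, text in sections:
--         key = (title, text[:200])
--         if key in seen:
--             continue
--         seen.add(key)
--         deduped.append((title, text))
--     return deduped
-- ===== SOURCE B (Python) =====
-- def parse_context_sections(blob):
--     # Reverse traversal: body lines are collected (in reverse) before their
--     # header is reached; a header claims the pending body as its segment.
--     segs = []
--     pending = []
--     for line in reversed(blob.splitlines()):
--         if line.startswith("----- FILE:"):
--             segs.append((line.split(":", 1)[-1].strip() or "Context", pending))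
--             pending = []
--         elif line.startswith("## "):
--             segs.append((line[3:].strip() or "Context", pending))
--             pending = []
--         elif not line.startswith("# "):
--             pending.append(line)
--     segs.append(("Context", pending))
--     out = {}
--     for title, rev in reversed(segs):
--         if rev:
--             text = "\n".join(reversed(rev)).strip()
--             out.setdefault((title, text[:200]), (title, text))
--     return list(out.values())
-- ===== Notes on version B (the rewrite author's own statement) =====
-- stated objective: alternative
-- what changed: B traverses the lines in reverse, collecting each body before meeting the header that titles it (sections built back-to-front), and deduplicates with an insertion-ordered dict via setdefault keyed by (title, text[:200]), instead of A's forward accumulator loop plus a separate set-and-list dedup pass.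
import Mathlib
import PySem

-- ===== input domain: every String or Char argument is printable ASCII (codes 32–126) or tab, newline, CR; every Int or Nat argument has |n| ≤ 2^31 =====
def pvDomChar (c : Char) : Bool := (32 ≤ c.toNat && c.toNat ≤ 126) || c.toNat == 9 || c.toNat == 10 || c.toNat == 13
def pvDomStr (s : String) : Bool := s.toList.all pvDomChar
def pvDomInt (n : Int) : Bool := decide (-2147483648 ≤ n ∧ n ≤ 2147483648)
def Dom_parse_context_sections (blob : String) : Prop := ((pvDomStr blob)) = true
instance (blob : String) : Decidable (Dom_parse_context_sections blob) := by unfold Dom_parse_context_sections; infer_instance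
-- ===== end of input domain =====

-- B is a reverse traversal that collects each body before meeting the header titling it
-- (sections built back-to-front) and dedups via an insertion-ordered dict (objective: alternative).

-- ===== PORT A =====

-- line.split(":", 1)[-1].strip() or "Context"
def pcsTitleFile (line : String) : String :=
  let t := PySem.Str.strip ((((PySem.Str.splitMax? line ":" 1).getD []).getLast?).getD "")
  if t = "" then "Context" else t

-- line[3:].strip() or "Context"
def pcsTitleHdr (line : String) : String :=
  let t := PySem.Str.strip (PySem.Str.slice line (some 3) none)
  if t = "" then "Context" else t

-- the first loop of A: state (sections, current_title, current_lines)
def pcsLoopA : List String → List (String × String) → String → List String →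
    (List (String × String) × String × List String)
  | [], secs, title, cur => (secs, title, cur)
  | line :: rest, secs, title, cur =>
    if PySem.Str.startswith line "----- FILE:" then
      let secs' := if cur ≠ [] then secs ++ [(title, PySem.Str.strip (PySem.Str.join "\n" cur))] else secs
      pcsLoopA rest secs' (pcsTitleFile line) []
    else if PySem.Str.startswith line "## " then
      let secs' := if cur ≠ [] then secs ++ [(title, PySem.Str.strip (PySem.Str.join "\n" cur))] else secs
      pcsLoopA rest secs' (pcsTitleHdr line) []
    else if PySem.Str.startswith line "# " then
      pcsLoopA rest secs title cur
    else
      pcsLoopA rest secs title (cur ++ [line])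

-- the second loop of A: state (deduped, seen)
def pcsDedup : List (String × String) → List (String × String) →
    PySem.Set (String × String) → (List (String × String) × PySem.Set (String × String))
  | [], ded, seen => (ded, seen)
  | (title, text) :: rest, ded, seen =>
    let key := (title, PySem.Str.slice text none (some 200))
    if PySem.Set.contains seen key then
      pcsDedup rest ded seen
    else
      pcsDedup rest (ded ++ [(title, text)]) (PySem.Set.add seen key)

def parse_context_sections (blob : String) : List (String × String) :=
  let st := pcsLoopA (PySem.Str.splitlines blob) [] "Context" []
  let sections :=
    if st.2.2 ≠ [] then st.1 ++ [(st.2.1, PySem.Str.strip (PySem.Str.join "\n" st.2.2))] else st.1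
  (pcsDedup sections [] PySem.Set.empty).1

-- ===== PORT B =====

-- B's reverse loop body: state (segs, pending); pending holds the lines of the
-- upcoming body in reverse order.
def pcsStepB (st : List (String × List String) × List String) (line : String) :
    List (String × List String) × List String :=
  if PySem.Str.startswith line "----- FILE:" then (st.1 ++ [(pcsTitleFile line, st.2)], [])
  else if PySem.Str.startswith line "## " then (st.1 ++ [(pcsTitleHdr line, st.2)], [])
  else if PySem.Str.startswith line "# " then st
  else (st.1, st.2 ++ [line])

-- B's second loop body: out.setdefault((title, text[:200]), (title, text)) on nonempty bodies
def pcsDictStep (d : PySem.Dict (String × String) (String × String))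
    (seg : String × List String) : PySem.Dict (String × String) (String × String) :=
  if seg.2 ≠ [] then
    let text := PySem.Str.strip (PySem.Str.join "\n" seg.2.reverse)
    PySem.Dict.setdefault d (seg.1, PySem.Str.slice text none (some 200)) (seg.1, text)
  else d

def parse_context_sections_alt (blob : String) : List (String × String) :=
  let st := ((PySem.Str.splitlines blob).reverse).foldl pcsStepB ([], [])
  let segs := st.1 ++ [("Context", st.2)]
  PySem.Dict.values (segs.reverse.foldl pcsDictStep PySem.Dict.empty)

-- ===== PRECONDITION & SPEC =====
def Spec_parse_context_sections (blob : String) (out : List (String × String)) : Prop := out = parse_context_sections_alt blob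
instance (blob : String) (out : List (String × String)) : Decidable (Spec_parse_context_sections blob out) := by unfold Spec_parse_context_sections; infer_instance

-- ===== CLAIM (what is proved, stated in full; the proofs are below) =====
def Claim_equal_parse_context_sections : Prop := ∀ (blob : String), Dom_parse_context_sections blob → Spec_parse_context_sections blob (parse_context_sections blob)

-- ===== LEMMAS AND PROOFS =====

-- emit one flushed section (0 or 1 elements), body in document order
def pcsEmit (title : String) (body : List String) : List (String × String) :=
  if body ≠ [] then [(title, PySem.Str.strip (PySem.Str.join "\n" body))] else []

-- A's sections list for a suffix of lines, starting from (title, cur)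
def pcsSecsA (ls : List String) (title : String) (cur : List String) : List (String × String) :=
  let st := pcsLoopA ls [] title cur
  if st.2.2 ≠ [] then st.1 ++ [(st.2.1, PySem.Str.strip (PySem.Str.join "\n" st.2.2))] else st.1

theorem pcs_ite_singleton {α} (c : Prop) [Decidable c] (a : List α) (x : α) :
    (if c then a ++ [x] else a) = a ++ (if c then [x] else []) := by
  split_ifs <;> simp

-- A's first loop only appends to `sections`
theorem pcsLoopA_append (ls : List String) (secs : List (String × String))
    (title : String) (cur : List String) :
    pcsLoopA ls secs title cur =
      (secs ++ (pcsLoopA ls [] title cur).1, (pcsLoopA ls [] title cur).2) := by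
  induction ls generalizing secs title cur with
  | nil => simp [pcsLoopA]
  | cons line rest ih =>
    cases h1 : PySem.Str.startswith line "----- FILE:" with
    | true =>
      simp only [pcsLoopA, h1, if_true, List.nil_append]
      rw [pcs_ite_singleton]
      set s0 := if cur ≠ [] then [(title, PySem.Str.strip (PySem.Str.join "\n" cur))]
        else ([] : List (String × String)) with hs0
      rw [ih (secs ++ s0) (pcsTitleFile line) [], ih s0 (pcsTitleFile line) []]
      simp [List.append_assoc]
    | false =>
      cases h2 : PySem.Str.startswith line "## " with
      | true =>
        simp only [pcsLoopA, h1, h2, Bool.false_eq_true, if_false, if_true, List.nil_append]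
        rw [pcs_ite_singleton]
        set s0 := if cur ≠ [] then [(title, PySem.Str.strip (PySem.Str.join "\n" cur))]
          else ([] : List (String × String)) with hs0
        rw [ih (secs ++ s0) (pcsTitleHdr line) [], ih s0 (pcsTitleHdr line) []]
        simp [List.append_assoc]
      | false =>
        cases h3 : PySem.Str.startswith line "# " with
        | true =>
          simp only [pcsLoopA, h1, h2, h3, Bool.false_eq_true, if_false, if_true]
          exact ih secs title cur
        | false =>
          simp only [pcsLoopA, h1, h2, h3, Bool.false_eq_true, if_false]
          exact ih secs title (cur ++ [line])

-- recurrences for pcsSecsA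
theorem pcsSecsA_nil (t : String) (cur : List String) : pcsSecsA [] t cur = pcsEmit t cur := by
  simp [pcsSecsA, pcsLoopA, pcsEmit]

theorem pcsSecsA_file (line : String) (rest : List String) (t : String) (cur : List String)
    (h : PySem.Str.startswith line "----- FILE:" = true) :
    pcsSecsA (line :: rest) t cur = pcsEmit t cur ++ pcsSecsA rest (pcsTitleFile line) [] := by
  simp only [pcsSecsA, pcsLoopA, h, if_true, List.nil_append]
  rw [pcs_ite_singleton, pcsLoopA_append]
  simp only [pcsEmit]
  split_ifs <;> simp

theorem pcsSecsA_hdr (line : String) (rest : List String) (t : String) (cur : List String)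
    (h1 : PySem.Str.startswith line "----- FILE:" = false)
    (h2 : PySem.Str.startswith line "## " = true) :
    pcsSecsA (line :: rest) t cur = pcsEmit t cur ++ pcsSecsA rest (pcsTitleHdr line) [] := by
  simp only [pcsSecsA, pcsLoopA, h1, h2, Bool.false_eq_true, if_false, if_true, List.nil_append]
  rw [pcs_ite_singleton, pcsLoopA_append]
  simp only [pcsEmit]
  split_ifs <;> simp

theorem pcsSecsA_cmt (line : String) (rest : List String) (t : String) (cur : List String)
    (h1 : PySem.Str.startswith line "----- FILE:" = false)
    (h2 : PySem.Str.startswith line "## " = false)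
    (h3 : PySem.Str.startswith line "# " = true) :
    pcsSecsA (line :: rest) t cur = pcsSecsA rest t cur := by
  simp only [pcsSecsA, pcsLoopA, h1, h2, h3, Bool.false_eq_true, if_false, if_true]

theorem pcsSecsA_other (line : String) (rest : List String) (t : String) (cur : List String)
    (h1 : PySem.Str.startswith line "----- FILE:" = false)
    (h2 : PySem.Str.startswith line "## " = false)
    (h3 : PySem.Str.startswith line "# " = false) :
    pcsSecsA (line :: rest) t cur = pcsSecsA rest t (cur ++ [line]) := by
  simp only [pcsSecsA, pcsLoopA, h1, h2, h3, Bool.false_eq_true, if_false]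

-- B's reverse fold peels the FIRST line of the document last
theorem pcsRevFold_cons (line : String) (rest : List String)
    (init : List (String × List String) × List String) :
    ((line :: rest).reverse).foldl pcsStepB init =
      pcsStepB ((rest.reverse).foldl pcsStepB init) line := by
  rw [List.reverse_cons, List.foldl_append]
  rfl

-- Phase 1: A's sections list equals the flat emission of B's reversed segment list
theorem pcs_phase1 (ls : List String) (t : String) (cur : List String) :
    pcsSecsA ls t cur =
      pcsEmit t (cur ++ ((ls.reverse).foldl pcsStepB ([], [])).2.reverse) ++
        (((ls.reverse).foldl pcsStepB ([], [])).1.reverse.flatMap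
          (fun seg => pcsEmit seg.1 seg.2.reverse)) := by
  induction ls generalizing t cur with
  | nil => simp [pcsSecsA_nil, pcsEmit]
  | cons line rest ih =>
    rw [pcsRevFold_cons]
    set st := (rest.reverse).foldl pcsStepB ([], []) with hst
    cases h1 : PySem.Str.startswith line "----- FILE:" with
    | true =>
      have hstep : pcsStepB st line = (st.1 ++ [(pcsTitleFile line, st.2)], []) := by
        unfold pcsStepB; rw [if_pos h1]
      rw [pcsSecsA_file line rest t cur h1, ih (pcsTitleFile line) [], hstep]
      simp only [List.reverse_append, List.reverse_cons, List.reverse_nil, List.nil_append,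
        List.append_nil, List.flatMap_cons, List.flatMap_append, List.flatMap_nil]
    | false =>
      cases h2 : PySem.Str.startswith line "## " with
      | true =>
        have hstep : pcsStepB st line = (st.1 ++ [(pcsTitleHdr line, st.2)], []) := by
          unfold pcsStepB; rw [if_neg (by rw [h1]; simp), if_pos h2]
        rw [pcsSecsA_hdr line rest t cur h1 h2, ih (pcsTitleHdr line) [], hstep]
        simp only [List.reverse_append, List.reverse_cons, List.reverse_nil, List.nil_append,
          List.append_nil, List.flatMap_cons, List.flatMap_append, List.flatMap_nil]
      | false =>
        cases h3 : PySem.Str.startswith line "# " with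
        | true =>
          have hstep : pcsStepB st line = st := by
            unfold pcsStepB; rw [if_neg (by rw [h1]; simp), if_neg (by rw [h2]; simp), if_pos h3]
          rw [pcsSecsA_cmt line rest t cur h1 h2 h3, ih t cur, hstep]
        | false =>
          have hstep : pcsStepB st line = (st.1, st.2 ++ [line]) := by
            unfold pcsStepB
            rw [if_neg (by rw [h1]; simp), if_neg (by rw [h2]; simp), if_neg (by rw [h3]; simp)]
          rw [pcsSecsA_other line rest t cur h1 h2 h3, ih t (cur ++ [line]), hstep]
          simp only [List.reverse_append, List.reverse_cons, List.reverse_nil, List.nil_append,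
            List.cons_append, List.append_assoc]

-- Set.add / contains interaction (proved here; used by phase 2)
theorem pcsSet_contains_add {A : Type} [BEq A] [LawfulBEq A] (s : PySem.Set A) (x y : A) :
    PySem.Set.contains (PySem.Set.add s x) y = (y == x || PySem.Set.contains s y) := by
  by_cases h : y = x
  · subst h
    have h1 : PySem.Set.contains (PySem.Set.add s y) y = true :=
      (PySem.Set.contains_iff _ _).mpr ((PySem.Set.mem_add _ _ _).mpr (Or.inr rfl))
    rw [h1]
    simp
  · have hbeq : (y == x) = false := by simp [h]
    rw [hbeq, Bool.false_or]
    cases hc : PySem.Set.contains s y with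
    | true =>
      exact (PySem.Set.contains_iff _ _).mpr
        ((PySem.Set.mem_add _ _ _).mpr (Or.inl ((PySem.Set.contains_iff _ _).mp hc)))
    | false =>
      cases hC : PySem.Set.contains (PySem.Set.add s x) y with
      | false => rfl
      | true =>
        rcases (PySem.Set.mem_add _ _ _).mp ((PySem.Set.contains_iff _ _).mp hC) with h1 | h1
        · rw [(PySem.Set.contains_iff _ _).mpr h1] at hc; exact hc
        · exact absurd h1 h

-- Phase 2: A's set-based dedup over the flat emission equals B's dict fold, under the
-- invariant that the dict's values are `ded` and its key set is `seen`.
theorem pcs_phase2 (L : List (String × List String)) (ded : List (String × String))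
    (seen : PySem.Set (String × String)) (d : PySem.Dict (String × String) (String × String))
    (hv : PySem.Dict.values d = ded)
    (hk : ∀ k, PySem.Set.contains seen k = PySem.Dict.contains d k) :
    (pcsDedup (L.flatMap (fun seg => pcsEmit seg.1 seg.2.reverse)) ded seen).1 =
      PySem.Dict.values (L.foldl pcsDictStep d) := by
  induction L generalizing ded seen d with
  | nil => simpa [pcsDedup] using hv.symm
  | cons seg rest ih =>
    rw [List.flatMap_cons, List.foldl_cons]
    by_cases hb : seg.2 = []
    · have h1 : pcsEmit seg.1 seg.2.reverse = [] := by simp [pcsEmit, hb]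
      have h2 : pcsDictStep d seg = d := by simp [pcsDictStep, hb]
      rw [h1, List.nil_append, h2]
      exact ih ded seen d hv hk
    · have hrev : seg.2.reverse ≠ [] := by simpa using hb
      set text := PySem.Str.strip (PySem.Str.join "\n" seg.2.reverse) with htext
      set key := (seg.1, PySem.Str.slice text none (some 200)) with hkey
      have h1 : pcsEmit seg.1 seg.2.reverse = [(seg.1, text)] := by
        simp [pcsEmit, hrev, htext]
      have h2 : pcsDictStep d seg = PySem.Dict.setdefault d key (seg.1, text) := by
        unfold pcsDictStep
        rw [if_pos (show seg.2 ≠ [] from hb)]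
      rw [h1, h2, List.singleton_append]
      simp only [pcsDedup, ← hkey]
      cases hc : PySem.Set.contains seen key with
      | true =>
        have hdc : PySem.Dict.contains d key = true := by rw [← hk]; exact hc
        rw [if_pos rfl, PySem.Dict.setdefault_of_contains d _ hdc]
        exact ih ded seen d hv hk
      | false =>
        have hdc : PySem.Dict.contains d key = false := by rw [← hk]; exact hc
        rw [if_neg (by simp), PySem.Dict.setdefault_of_not_contains d _ hdc]
        refine ih _ _ _ ?_ ?_
        · show PySem.Dict.values (PySem.Dict.insert d key (seg.1, text)) = ded ++ [(seg.1, text)]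
          have hit := PySem.Dict.items_insert_of_not_contains d (seg.1, text) hdc
          simp only [PySem.Dict.values] at hv ⊢
          rw [hit, List.map_append, hv]
          rfl
        · intro k
          rw [pcsSet_contains_add, PySem.Dict.contains_insert, hk k]

-- ===== VERDICT (by name: the statement is the Claim_ definition above) =====
theorem parse_context_sections_spec : Claim_equal_parse_context_sections := by
  intro blob _
  show _ = _
  show (pcsDedup
      (if (pcsLoopA (PySem.Str.splitlines blob) [] "Context" []).2.2 ≠ [] then
        (pcsLoopA (PySem.Str.splitlines blob) [] "Context" []).1 ++
          [((pcsLoopA (PySem.Str.splitlines blob) [] "Context" []).2.1,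
            PySem.Str.strip (PySem.Str.join "\n" (pcsLoopA (PySem.Str.splitlines blob) [] "Context" []).2.2))]
      else (pcsLoopA (PySem.Str.splitlines blob) [] "Context" []).1) [] PySem.Set.empty).1 =
    PySem.Dict.values
      (((((PySem.Str.splitlines blob).reverse).foldl pcsStepB ([], [])).1 ++
          [("Context", (((PySem.Str.splitlines blob).reverse).foldl pcsStepB ([], [])).2)]).reverse.foldl
        pcsDictStep PySem.Dict.empty)
  have h1 := pcs_phase1 (PySem.Str.splitlines blob) "Context" []
  simp only [pcsSecsA, List.nil_append] at h1
  rw [h1]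
  have hflat :
      pcsEmit "Context"
          ((((PySem.Str.splitlines blob).reverse).foldl pcsStepB ([], [])).2.reverse) ++
        ((((PySem.Str.splitlines blob).reverse).foldl pcsStepB ([], [])).1.reverse.flatMap
          (fun seg => pcsEmit seg.1 seg.2.reverse)) =
      (((((PySem.Str.splitlines blob).reverse).foldl pcsStepB ([], [])).1 ++
          [("Context", (((PySem.Str.splitlines blob).reverse).foldl pcsStepB ([], [])).2)]).reverse.flatMap
        (fun seg => pcsEmit seg.1 seg.2.reverse)) := by
    rw [List.reverse_append, List.flatMap_append]
    simp
  rw [hflat]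
  exact pcs_phase2 _ [] PySem.Set.empty PySem.Dict.empty rfl
    (fun k => by simp [PySem.Set.empty, PySem.Set.contains, PySem.Dict.contains_empty])
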